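-- pv_equiv track=rewrite | github.com/ahmedalimdsibgatallah/Hill-Climbing | main.py | state_generation
-- ===== SOURCE A (Python) =====
-- def calc_cost(state):
--     cost = 0
--
--     for i in range(len(state)):
--         for j in range(i + 1, len(state)):
--             if state[i] > state[j]:
--                 cost += 1
--
--     return cost
--
-- def state_generation(state, cost):
--     min_state = state.copy()
--     min_cost = cost
--
--     for i in range(len(state)):
--         for j in range(i + 1, len(state)):
--             if state[i] > state[j]:
--                 new_state = state.copy()
--                 new_state[i], new_state[j] = new_state[j], new_state[i]
--                 new_cost = calc_cost(new_state)
--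
--                 if new_cost < min_cost:
--                     min_cost = new_cost
--                     min_state = new_state
--
--     if min_cost < cost:
--         return min_state, min_cost
--     else:
--         return state, None
-- ===== SOURCE B (Python) =====
-- def _inv(xs):
--     if not xs:
--         return 0
--     head, tail = xs[0], xs[1:]
--     return sum(1 for x in tail if head > x) + _inv(tail)
--
-- def state_generation(state, cost):
--     n = len(state)
--     base = _inv(state)
--     best = None  # (new_cost, i, j) of the best swap seen so far
--     for i in range(n):
--         a = state[i]
--         for j in range(i + 1, n):
--             b = state[j]
--             if a > b:
--                 delta = -1
--                 for k in range(i + 1, j):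
--                     x = state[k]
--                     delta += (b > x) - (a > x) + (x > a) - (x > b)
--                 nc = base + delta
--                 if best is None or nc < best[0]:
--                     best = (nc, i, j)
--     if best is not None and best[0] < cost:
--         nc, i, j = best
--         ns = state.copy()
--         ns[i], ns[j] = ns[j], ns[i]
--         return ns, nc
--     return state, None
-- ===== Notes on version B (the rewrite author's own statement) =====
-- stated objective: faster
-- what changed: B computes the inversion count of the input once, then evaluates each candidate swap's cost in O(n) as base + delta over the elements strictly between the swapped positions (instead of recomputing the full O(n^2) inversion count per swap), tracking only the best (cost,i,j) triple and building the swapped list once at the end.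
import Mathlib
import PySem

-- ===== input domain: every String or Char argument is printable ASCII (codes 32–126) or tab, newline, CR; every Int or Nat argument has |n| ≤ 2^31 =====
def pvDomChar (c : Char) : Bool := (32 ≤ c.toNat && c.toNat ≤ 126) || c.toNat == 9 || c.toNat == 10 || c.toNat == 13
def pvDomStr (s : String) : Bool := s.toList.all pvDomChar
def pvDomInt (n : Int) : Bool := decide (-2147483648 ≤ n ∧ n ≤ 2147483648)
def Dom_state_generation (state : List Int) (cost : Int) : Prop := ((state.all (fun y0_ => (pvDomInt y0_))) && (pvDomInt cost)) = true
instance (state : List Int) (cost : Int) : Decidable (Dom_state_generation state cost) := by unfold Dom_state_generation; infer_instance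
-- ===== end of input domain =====

-- B replaces A's per-swap full O(n^2) inversion recount by a one-time base count plus an O(n) delta
-- per candidate swap (objective: faster; the return value is identical, neither version mutates its input).

-- ===== PORT A =====
-- new_state[i], new_state[j] = new_state[j], new_state[i] on a copy of state; i, j come from
-- range(len(state)), so they are nonnegative and in range and .toNat / List.set are exact here.
def pvSwapA (state : List Int) (i j : Int) : List Int :=
  (state.set i.toNat (PySem.List.pyGetD state j 0)).set j.toNat (PySem.List.pyGetD state i 0)

def calc_cost (state : List Int) : Int :=
  (PySem.List.pyRange 0 (state.length : Int) 1).foldl (fun cost i =>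
    (PySem.List.pyRange (i + 1) (state.length : Int) 1).foldl (fun cost j =>
      if PySem.List.pyGetD state i 0 > PySem.List.pyGetD state j 0 then cost + 1 else cost)
      cost) 0

def state_generation (state : List Int) (cost : Int) : List Int × Option Int :=
  let r := (PySem.List.pyRange 0 (state.length : Int) 1).foldl (fun acc i =>
    (PySem.List.pyRange (i + 1) (state.length : Int) 1).foldl (fun acc j =>
      if PySem.List.pyGetD state i 0 > PySem.List.pyGetD state j 0 then
        let new_state := pvSwapA state i j
        let new_cost := calc_cost new_state
        if new_cost < acc.2 then (new_state, new_cost) else acc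
      else acc) acc) (state, cost)
  if r.2 < cost then (r.1, some r.2) else (state, none)

-- ===== PORT B =====
-- _inv(xs): structural recursion, sum(1 for x in tail if head > x) + _inv(tail)
def pvInvRec : List Int → Int
  | [] => 0
  | head :: tail => ((tail.countP (fun x => decide (head > x)) : Nat) : Int) + pvInvRec tail

def state_generation_alt (state : List Int) (cost : Int) : List Int × Option Int :=
  let n : Int := (state.length : Int)
  let base := pvInvRec state
  let best := (PySem.List.pyRange 0 n 1).foldl (fun best i =>
    let a := PySem.List.pyGetD state i 0
    (PySem.List.pyRange (i + 1) n 1).foldl (fun best j =>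
      let b := PySem.List.pyGetD state j 0
      if a > b then
        let delta := (PySem.List.pyRange (i + 1) j 1).foldl (fun delta k =>
          let x := PySem.List.pyGetD state k 0
          delta + ((if b > x then (1 : Int) else 0) - (if a > x then 1 else 0) +
            ((if x > a then (1 : Int) else 0) - (if x > b then 1 else 0)))) (-1)
        let nc := base + delta
        match best with
        | none => some (nc, i, j)
        | some (bc, bi, bj) => if nc < bc then some (nc, i, j) else some (bc, bi, bj)
      else best) best) (none : Option (Int × Int × Int))
  match best with
  | some (nc, i, j) =>
      if nc < cost then
        -- ns[i], ns[j] = ns[j], ns[i] on a copy; i, j are in range, .toNat / List.set exact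
        ((state.set i.toNat (PySem.List.pyGetD state j 0)).set j.toNat
          (PySem.List.pyGetD state i 0), some nc)
      else (state, none)
  | none => (state, none)

-- ===== PRECONDITION & SPEC =====
def Spec_state_generation (state : List Int) (cost : Int) (out : List Int × Option Int) : Prop := out = state_generation_alt state cost
instance (state : List Int) (cost : Int) (out : List Int × Option Int) : Decidable (Spec_state_generation state cost out) := by unfold Spec_state_generation; infer_instance

-- ===== CLAIM (what is proved, stated in full; the proofs are below) =====
def Claim_equal_state_generation : Prop := ∀ (state : List Int) (cost : Int), Dom_state_generation state cost → Spec_state_generation state cost (state_generation state cost)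


-- ===== LEMMAS AND PROOFS =====

-- generic simulation between two folds over the same list
theorem pvFoldlRel {a b g : Type} (R : a -> b -> Prop) (f : a -> g -> a) (gg : b -> g -> b)
    (l : List g) (x : a) (y : b) (hxy : R x y)
    (hstep : forall p q c, c ∈ l -> R p q -> R (f p c) (gg q c)) :
    R (l.foldl f x) (l.foldl gg y) := by
  induction l generalizing x y with
  | nil => exact hxy
  | cons c t ih =>
    exact ih (f x c) (gg y c) (hstep x y c (by simp) hxy)
      (fun p q c' hc' => hstep p q c' (by simp [hc']))

-- mapping an index loop over getD is mapping over the list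
theorem pvMapRangeGetD {b : Type} (f : Int -> b) (l : List Int) :
    (List.range l.length).map (fun k => f (l.getD k 0)) = l.map f := by
  induction l with
  | nil => simp
  | cons h t ih =>
    simp only [List.length_cons, List.range_succ_eq_map, List.map_cons, List.map_map]
    simp only [Function.comp_def, List.getD_cons_succ, List.getD_cons_zero]
    rw [ih]

theorem pvSumRange_eq_inv (s : List Int) :
    ((List.range s.length).map (fun k =>
      (((s.drop (k+1)).countP (fun x => decide (s.getD k 0 > x)) : Nat) : Int))).sum = pvInvRec s := by
  induction s with
  | nil => simp [pvInvRec]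
  | cons h t ih =>
    simp only [List.length_cons, List.range_succ_eq_map, List.map_cons, List.map_map,
      List.sum_cons, Function.comp_def, List.getD_cons_succ, List.getD_cons_zero,
      List.drop_succ_cons, pvInvRec, List.drop_zero, Nat.succ_eq_add_one]
    rw [ih]

theorem pvCalcCost_eq_inv (s : List Int) : calc_cost s = pvInvRec s := by
  have h1 : calc_cost s = (PySem.List.pyRange 0 (s.length : Int) 1).foldl
      (fun c i => c + (((s.drop (i+1).toNat).countP
        (fun x => decide (PySem.List.pyGetD s i 0 > x)) : Nat) : Int)) 0 := by
    unfold calc_cost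
    apply PySem.List.foldl_congr_mem
    intro c i hi
    have h0 : (0:Int) ≤ i + 1 := by
      have := (PySem.List.mem_pyRange_one.mp hi).1; omega
    rw [PySem.List.foldl_pyRange_pyGetD' s 0
        (fun c x => if PySem.List.pyGetD s i 0 > x then c + 1 else c) c h0,
      PySem.List.foldl_ite_add_one]
  rw [h1, PySem.List.foldl_add
    (g := fun i => (((s.drop (i+1).toNat).countP
      (fun x => decide (PySem.List.pyGetD s i 0 > x)) : Nat) : Int)),
    PySem.List.pyRange_one]
  simp only [Int.sub_zero, Int.toNat_natCast, List.map_map, Function.comp_def, zero_add,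
    PySem.List.pyGetD_natCast]
  simp only [← Nat.cast_add_one, Int.toNat_natCast]
  rw [pvSumRange_eq_inv]

def pvCross (P X : List Int) : Int :=
  (P.map (fun p => ((X.countP (fun x => decide (p > x)) : Nat) : Int))).sum

theorem pvInv_append (P X : List Int) :
    pvInvRec (P ++ X) = pvInvRec P + pvCross P X + pvInvRec X := by
  induction P with
  | nil => simp [pvInvRec, pvCross]
  | cons p t ih =>
    simp only [List.cons_append, pvInvRec, pvCross, List.countP_append, List.map_cons,
      List.sum_cons] at *
    push_cast
    omega

theorem pvCross_cons_right (P : List Int) (y : Int) (S : List Int) :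
    pvCross P (y :: S) = ((P.countP (fun p => decide (p > y)) : Nat) : Int) + pvCross P S := by
  induction P with
  | nil => simp [pvCross]
  | cons p t ih =>
    simp only [pvCross, List.map_cons, List.sum_cons] at ih ⊢
    rw [ih, List.countP_cons, List.countP_cons]
    push_cast
    split_ifs <;> simp_all <;> omega

theorem pvCross_perm (P : List Int) {X X' : List Int} (h : X.Perm X') :
    pvCross P X = pvCross P X' := by
  unfold pvCross
  simp only [h.countP_eq]

theorem pvInv_swap (P M S : List Int) (a b : Int) (hab : a > b) :
    pvInvRec (P ++ (b :: (M ++ a :: S))) =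
      pvInvRec (P ++ (a :: (M ++ b :: S))) +
        (-1 + (((M.countP (fun x => decide (b > x)) : Nat) : Int)
             - ((M.countP (fun x => decide (a > x)) : Nat) : Int)
             + (((M.countP (fun x => decide (x > a)) : Nat) : Int)
             - ((M.countP (fun x => decide (x > b)) : Nat) : Int)))) := by
  have h1 : (M ++ a :: S).Perm (a :: (M ++ S)) := List.perm_middle
  have h2 : (M ++ b :: S).Perm (b :: (M ++ S)) := List.perm_middle
  have hperm : (b :: (M ++ a :: S)).Perm (a :: (M ++ b :: S)) :=
    ((h1.cons b).trans ((List.Perm.swap a b (M ++ S)).trans ((h2.symm).cons a)))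
  have e1 : ∀ (x y : Int), pvInvRec (x :: (M ++ y :: S)) =
      ((M.countP (fun t => decide (x > t)) : Nat) : Int) + (if x > y then 1 else 0)
      + ((S.countP (fun t => decide (x > t)) : Nat) : Int)
      + (pvInvRec M + ((M.countP (fun t => decide (t > y)) : Nat) : Int) + pvCross M S
      + ((S.countP (fun t => decide (y > t)) : Nat) : Int) + pvInvRec S) := by
    intro x y
    simp only [pvInvRec]
    rw [pvInv_append, pvCross_cons_right, List.countP_append, List.countP_cons]
    simp only [pvInvRec]
    push_cast
    simp only [decide_eq_true_eq]
    split_ifs <;> omega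
  rw [pvInv_append P (b :: (M ++ a :: S)), pvInv_append P (a :: (M ++ b :: S)),
    pvCross_perm P hperm, e1, e1]
  rw [if_neg (show ¬ b > a from by omega), if_pos hab]
  omega

theorem pvSetSetMid (M S : List Int) (b a' : Int) :
    (M ++ b :: S).set M.length a' = M ++ a' :: S := by
  induction M with
  | nil => simp
  | cons m t ih => simp [ih]

theorem pvSetSet (P M S : List Int) (a b a' b' : Int) :
    ((P ++ (a :: (M ++ b :: S))).set P.length b').set (P.length + (M.length + 1)) a'
      = P ++ (b' :: (M ++ a' :: S)) := by
  induction P with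
  | nil =>
    simp only [List.nil_append, List.length_nil, List.set_cons_zero, Nat.zero_add,
      List.set_cons_succ]
    rw [pvSetSetMid]
  | cons p t ih =>
    simp only [List.cons_append, List.length_cons, List.set_cons_succ]
    rw [show t.length + 1 + (M.length + 1) = (t.length + (M.length + 1)) + 1 from by omega]
    simp only [List.set_cons_succ]
    rw [ih]

theorem pvDecomp (s : List Int) (ki kj : Nat) (hij : ki < kj) (hj : kj < s.length) :
    s = s.take ki ++ (s.getD ki 0 ::
      (((s.drop (ki+1)).take (kj - ki - 1)) ++ (s.getD kj 0 :: s.drop (kj+1)))) := by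
  have h2 : s.drop ki = s.getD ki 0 :: s.drop (ki+1) := by
    rw [List.getD_eq_getElem s 0 (show ki < s.length from by omega)]
    exact List.drop_eq_getElem_cons (by omega)
  have h4 : s.drop kj = s.getD kj 0 :: s.drop (kj+1) := by
    rw [List.getD_eq_getElem s 0 hj]
    exact List.drop_eq_getElem_cons hj
  have h3 : s.drop (ki+1) = (s.drop (ki+1)).take (kj - ki - 1) ++ s.drop kj := by
    have h5 := List.take_append_drop (kj - ki - 1) (s.drop (ki+1))
    rw [List.drop_drop, show ki + 1 + (kj - ki - 1) = kj from by omega] at h5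
    exact h5.symm
  conv_lhs => rw [← List.take_append_drop ki s, h2, h3, h4]

theorem pvSumE (M : List Int) (a b : Int) :
    (M.map (fun x =>
      (if b > x then (1:Int) else 0) - (if a > x then 1 else 0) +
        ((if x > a then (1:Int) else 0) - (if x > b then 1 else 0)))).sum
    = ((M.countP (fun x => decide (b > x)) : Nat) : Int)
      - ((M.countP (fun x => decide (a > x)) : Nat) : Int)
      + (((M.countP (fun x => decide (x > a)) : Nat) : Int)
      - ((M.countP (fun x => decide (x > b)) : Nat) : Int)) := by
  induction M with
  | nil => simp
  | cons m t ih =>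
    simp only [List.map_cons, List.sum_cons, List.countP_cons, ih, decide_eq_true_eq]
    push_cast
    split_ifs <;> omega

theorem pvCandInt (s : List Int) (i j : Int) (h0 : 0 ≤ i) (hij : i < j)
    (hj : j < (s.length : Int))
    (hab : PySem.List.pyGetD s i 0 > PySem.List.pyGetD s j 0) :
    pvInvRec s + (PySem.List.pyRange (i+1) j 1).foldl (fun d k =>
      d + ((if PySem.List.pyGetD s j 0 > PySem.List.pyGetD s k 0 then (1:Int) else 0)
          - (if PySem.List.pyGetD s i 0 > PySem.List.pyGetD s k 0 then 1 else 0) +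
          ((if PySem.List.pyGetD s k 0 > PySem.List.pyGetD s i 0 then (1:Int) else 0)
          - (if PySem.List.pyGetD s k 0 > PySem.List.pyGetD s j 0 then 1 else 0)))) (-1)
    = calc_cost (pvSwapA s i j) := by
  obtain ⟨ki, rfl⟩ : ∃ k : Nat, i = (k : Int) := ⟨i.toNat, (Int.toNat_of_nonneg h0).symm⟩
  obtain ⟨kj, rfl⟩ : ∃ k : Nat, j = (k : Int) := ⟨j.toNat, (Int.toNat_of_nonneg (by omega)).symm⟩
  have hij' : ki < kj := by exact_mod_cast hij
  have hj' : kj < s.length := by exact_mod_cast hj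
  simp only [PySem.List.pyGetD_natCast] at hab ⊢
  set A0 := s.getD ki 0 with hA0
  set B0 := s.getD kj 0 with hB0
  set P := s.take ki with hP
  set M := (s.drop (ki+1)).take (kj - ki - 1) with hMdef
  set S := s.drop (kj+1) with hS
  have hM : M.length = kj - ki - 1 := by
    rw [hMdef]; simp [List.length_take, List.length_drop]; omega
  have hPl : P.length = ki := by rw [hP]; simp [List.length_take]; omega
  -- the delta fold is the countP combination over M
  have hdelta : (PySem.List.pyRange ((ki : Int)+1) (kj : Int) 1).foldl (fun d k =>
      d + ((if B0 > PySem.List.pyGetD s k 0 then (1:Int) else 0)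
          - (if A0 > PySem.List.pyGetD s k 0 then 1 else 0) +
          ((if PySem.List.pyGetD s k 0 > A0 then (1:Int) else 0)
          - (if PySem.List.pyGetD s k 0 > B0 then 1 else 0)))) (-1)
      = -1 + (((M.countP (fun x => decide (B0 > x)) : Nat) : Int)
          - ((M.countP (fun x => decide (A0 > x)) : Nat) : Int)
          + (((M.countP (fun x => decide (x > A0)) : Nat) : Int)
          - ((M.countP (fun x => decide (x > B0)) : Nat) : Int))) := by
    rw [← pvSumE M A0 B0, ← pvMapRangeGetD (fun x : Int =>
      (if B0 > x then (1:Int) else 0) - (if A0 > x then 1 else 0) +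
        ((if x > A0 then (1:Int) else 0) - (if x > B0 then 1 else 0))) M]
    rw [PySem.List.foldl_add (g := fun k =>
      (if B0 > PySem.List.pyGetD s k 0 then (1:Int) else 0)
          - (if A0 > PySem.List.pyGetD s k 0 then 1 else 0) +
          ((if PySem.List.pyGetD s k 0 > A0 then (1:Int) else 0)
          - (if PySem.List.pyGetD s k 0 > B0 then 1 else 0)))]
    rw [PySem.List.pyRange_one,
      show ((kj : Int) - ((ki : Int) + 1)).toNat = kj - ki - 1 from by omega,
      List.map_map, ← hM]
    congr 1
    congr 1
    apply List.map_congr_left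
    intro t ht
    have ht' : t < M.length := List.mem_range.mp ht
    have hlt : ki + 1 + t < s.length := by omega
    have hgm : M.getD t 0 = s.getD (ki + 1 + t) 0 := by
      rw [hMdef, List.getD_eq_getElem _ 0 (by rw [← hMdef]; exact ht'),
        List.getD_eq_getElem s 0 hlt]
      simp [List.getElem_take, List.getElem_drop]
    simp only [Function.comp_def, hgm]
    rw [show (ki : Int) + 1 + (t : Int) = ((ki + 1 + t : Nat) : Int) from by push_cast; ring]
    simp only [PySem.List.pyGetD_natCast]
  rw [hdelta, pvCalcCost_eq_inv]
  -- rewrite the swapped list through the decomposition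
  have hdec : s = P ++ (A0 :: (M ++ B0 :: S)) := pvDecomp s ki kj hij' hj'
  have hswap : pvSwapA s (ki : Int) (kj : Int) = P ++ (B0 :: (M ++ A0 :: S)) := by
    unfold pvSwapA
    simp only [Int.toNat_natCast, PySem.List.pyGetD_natCast, ← hA0, ← hB0]
    conv_lhs => rw [hdec]
    rw [show ki = P.length from hPl.symm]
    rw [show kj = P.length + (M.length + 1) from by omega]
    exact pvSetSet P M S A0 B0 A0 B0
  rw [hswap]
  conv_lhs => rw [hdec]
  rw [pvInv_swap P M S A0 B0 hab]


def pvRel (s : List Int) (c : Int) (x : List Int × Int) (y : Option (Int × Int × Int)) : Prop :=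
  match y with
  | none => x = (s, c)
  | some (nc, i, j) =>
      nc = calc_cost (pvSwapA s i j) ∧
      x = (if nc < c then (pvSwapA s i j, nc) else (s, c))

theorem pvRel_init (s : List Int) (c : Int) : pvRel s c (s, c) none := rfl

theorem pvStep_none (s : List Int) (c : Int) (i j : Int) (x : List Int × Int)
    (hR : pvRel s c x none) (nc : Int) (hnc : nc = calc_cost (pvSwapA s i j)) :
    pvRel s c
      (if calc_cost (pvSwapA s i j) < x.2 then (pvSwapA s i j, calc_cost (pvSwapA s i j)) else x)
      (some (nc, i, j)) := by
  have hx : x = (s, c) := hR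
  subst hx hnc
  exact ⟨rfl, by split_ifs <;> simp_all⟩

theorem pvStep_some (s : List Int) (c : Int) (i j : Int) (x : List Int × Int)
    (bc bi bj : Int) (hR : pvRel s c x (some (bc, bi, bj))) (nc : Int)
    (hnc : nc = calc_cost (pvSwapA s i j)) :
    pvRel s c
      (if calc_cost (pvSwapA s i j) < x.2 then (pvSwapA s i j, calc_cost (pvSwapA s i j)) else x)
      (if nc < bc then some (nc, i, j) else some (bc, bi, bj)) := by
  obtain ⟨hbc, hx⟩ := hR
  subst hx hnc hbc
  by_cases h2 : calc_cost (pvSwapA s i j) < calc_cost (pvSwapA s bi bj)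
  · rw [if_pos h2]
    refine ⟨rfl, ?_⟩
    by_cases h1 : calc_cost (pvSwapA s bi bj) < c
    · rw [if_pos h1]
      dsimp only
      split_ifs <;> first | rfl | (exfalso; omega)
    · rw [if_neg h1]
  · rw [if_neg h2]
    refine ⟨rfl, ?_⟩
    by_cases h1 : calc_cost (pvSwapA s bi bj) < c
    · rw [if_pos h1]
      dsimp only
      split_ifs
      rfl
    · rw [if_neg h1]
      dsimp only
      split_ifs <;> first | rfl | (exfalso; omega)

-- ===== VERDICT (by name: the statement is the Claim_ definition above) =====
theorem state_generation_spec : Claim_equal_state_generation := by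
  intro state cost _
  show state_generation state cost = state_generation_alt state cost
  unfold state_generation state_generation_alt
  dsimp only
  have hstep : ∀ (xA : List Int × Int) (xB : Option (Int × Int × Int)) (i : Int),
      i ∈ PySem.List.pyRange 0 (state.length : Int) 1 → pvRel state cost xA xB →
      pvRel state cost
        ((PySem.List.pyRange (i + 1) (state.length : Int) 1).foldl (fun acc j =>
          if PySem.List.pyGetD state i 0 > PySem.List.pyGetD state j 0 then
            if calc_cost (pvSwapA state i j) < acc.2 then
              (pvSwapA state i j, calc_cost (pvSwapA state i j))
            else acc
          else acc) xA)
        ((PySem.List.pyRange (i + 1) (state.length : Int) 1).foldl (fun best j =>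
          if PySem.List.pyGetD state i 0 > PySem.List.pyGetD state j 0 then
            match best with
            | none => some (pvInvRec state +
                List.foldl
                  (fun delta k =>
                    delta +
                      (((if PySem.List.pyGetD state j 0 > PySem.List.pyGetD state k 0 then 1 else 0) -
                          if PySem.List.pyGetD state i 0 > PySem.List.pyGetD state k 0 then 1 else 0) +
                        ((if PySem.List.pyGetD state k 0 > PySem.List.pyGetD state i 0 then 1 else 0) -
                          if PySem.List.pyGetD state k 0 > PySem.List.pyGetD state j 0 then 1 else 0)))
                  (-1) (PySem.List.pyRange (i + 1) j 1), i, j)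
            | some (bc, bi, bj) =>
              if pvInvRec state +
                List.foldl
                  (fun delta k =>
                    delta +
                      (((if PySem.List.pyGetD state j 0 > PySem.List.pyGetD state k 0 then 1 else 0) -
                          if PySem.List.pyGetD state i 0 > PySem.List.pyGetD state k 0 then 1 else 0) +
                        ((if PySem.List.pyGetD state k 0 > PySem.List.pyGetD state i 0 then 1 else 0) -
                          if PySem.List.pyGetD state k 0 > PySem.List.pyGetD state j 0 then 1 else 0)))
                  (-1) (PySem.List.pyRange (i + 1) j 1) < bc then some (pvInvRec state +
                List.foldl
                  (fun delta k =>
                    delta +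
                      (((if PySem.List.pyGetD state j 0 > PySem.List.pyGetD state k 0 then 1 else 0) -
                          if PySem.List.pyGetD state i 0 > PySem.List.pyGetD state k 0 then 1 else 0) +
                        ((if PySem.List.pyGetD state k 0 > PySem.List.pyGetD state i 0 then 1 else 0) -
                          if PySem.List.pyGetD state k 0 > PySem.List.pyGetD state j 0 then 1 else 0)))
                  (-1) (PySem.List.pyRange (i + 1) j 1), i, j) else some (bc, bi, bj)
          else best) xB) := by
    intro xA xB i hi hR
    refine pvFoldlRel (pvRel state cost) _ _ _ _ _ hR ?_
    intro yA yB j hj hR2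
    dsimp only
    by_cases hc : PySem.List.pyGetD state i 0 > PySem.List.pyGetD state j 0
    · rw [if_pos hc, if_pos hc]
      have hb1 := PySem.List.mem_pyRange_one.mp hi
      have hb2 := PySem.List.mem_pyRange_one.mp hj
      have hcand := pvCandInt state i j (by omega) (by omega) (by omega) hc
      rcases yB with _ | ⟨bc, bi, bj⟩
      · exact pvStep_none state cost i j yA hR2 _ hcand
      · exact pvStep_some state cost i j yA bc bi bj hR2 _ hcand
    · rw [if_neg hc, if_neg hc]
      exact hR2
  have main := pvFoldlRel (pvRel state cost) _ _
    (PySem.List.pyRange 0 (state.length : Int) 1) (state, cost) none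
    (pvRel_init state cost) hstep
  rcases hB : (PySem.List.pyRange 0 (state.length : Int) 1).foldl (fun best i =>
      (PySem.List.pyRange (i + 1) (state.length : Int) 1).foldl (fun best j =>
        if PySem.List.pyGetD state i 0 > PySem.List.pyGetD state j 0 then
          match best with
          | none => some (pvInvRec state +
                List.foldl
                  (fun delta k =>
                    delta +
                      (((if PySem.List.pyGetD state j 0 > PySem.List.pyGetD state k 0 then 1 else 0) -
                          if PySem.List.pyGetD state i 0 > PySem.List.pyGetD state k 0 then 1 else 0) +
                        ((if PySem.List.pyGetD state k 0 > PySem.List.pyGetD state i 0 then 1 else 0) -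
                          if PySem.List.pyGetD state k 0 > PySem.List.pyGetD state j 0 then 1 else 0)))
                  (-1) (PySem.List.pyRange (i + 1) j 1), i, j)
          | some (bc, bi, bj) =>
            if pvInvRec state +
                List.foldl
                  (fun delta k =>
                    delta +
                      (((if PySem.List.pyGetD state j 0 > PySem.List.pyGetD state k 0 then 1 else 0) -
                          if PySem.List.pyGetD state i 0 > PySem.List.pyGetD state k 0 then 1 else 0) +
                        ((if PySem.List.pyGetD state k 0 > PySem.List.pyGetD state i 0 then 1 else 0) -
                          if PySem.List.pyGetD state k 0 > PySem.List.pyGetD state j 0 then 1 else 0)))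
                  (-1) (PySem.List.pyRange (i + 1) j 1) < bc then some (pvInvRec state +
                List.foldl
                  (fun delta k =>
                    delta +
                      (((if PySem.List.pyGetD state j 0 > PySem.List.pyGetD state k 0 then 1 else 0) -
                          if PySem.List.pyGetD state i 0 > PySem.List.pyGetD state k 0 then 1 else 0) +
                        ((if PySem.List.pyGetD state k 0 > PySem.List.pyGetD state i 0 then 1 else 0) -
                          if PySem.List.pyGetD state k 0 > PySem.List.pyGetD state j 0 then 1 else 0)))
                  (-1) (PySem.List.pyRange (i + 1) j 1), i, j) else some (bc, bi, bj)
        else best) best) (none : Option (Int × Int × Int)) with _ | ⟨nc, bi, bj⟩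
  · rw [hB] at main
    have hA : _ = (state, cost) := main
    rw [hB, hA]
    simp
  · rw [hB] at main
    obtain ⟨hnc, hx⟩ := main
    rw [hB, hx]
    by_cases hlt : nc < cost
    · rw [if_pos hlt]
      simp [pvSwapA, hlt]
    · rw [if_neg hlt]
      simp [hlt]
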